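-- pv_equiv track=rewrite | github.com/myvonneflores/found | companies/management/commands/import_companies.py | normalize_business_category
-- ===== SOURCE A (Python) =====
-- BUSINESS_CATEGORY_PRIORITY = [
--     "Food",
--     "Health/Wellness & Beauty",
--     "Retail",
-- ]
--
-- def clean_value(value):
--     if value is None:
--         return ""
--     return value.strip()
--
-- def split_multi_value(value):
--     cleaned = clean_value(value)
--     if not cleaned:
--         return []
--     return [item.strip() for item in cleaned.split(";") if item.strip()]
--
-- def normalize_business_category(value):
--     candidates = split_multi_value(value)
--     if not candidates:
--         return ""
--
--     unique_candidates = {candidate for candidate in candidates}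
--     for category in BUSINESS_CATEGORY_PRIORITY:
--         if category in unique_candidates:
--             return category
--
--     return candidates[0]
-- ===== SOURCE B (Python) =====
-- BUSINESS_CATEGORY_PRIORITY = [
--     "Food",
--     "Health/Wellness & Beauty",
--     "Retail",
-- ]
--
-- _RANK = {category: rank for rank, category in enumerate(BUSINESS_CATEGORY_PRIORITY)}
--
--
-- def clean_value(value):
--     if value is None:
--         return ""
--     return value.strip()
--
--
-- def split_multi_value(value):
--     cleaned = clean_value(value)
--     if not cleaned:
--         return []
--     return [item.strip() for item in cleaned.split(";") if item.strip()]
--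
--
-- def normalize_business_category(value):
--     candidates = split_multi_value(value)
--     if not candidates:
--         return ""
--     best = None  # (rank, category) with the smallest rank seen so far
--     for candidate in candidates:
--         rank = _RANK.get(candidate)
--         if rank is not None and (best is None or rank < best[0]):
--             best = (rank, candidate)
--     return best[1] if best is not None else candidates[0]
-- ===== Notes on version B (the rewrite author's own statement) =====
-- stated objective: idiomatic
-- what changed: Instead of building a set of candidates and scanning the fixed priority list against it, B builds a rank map once and makes a single pass over the candidates themselves, tracking the (rank, category) pair with the smallest rank.
import Mathlib
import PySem

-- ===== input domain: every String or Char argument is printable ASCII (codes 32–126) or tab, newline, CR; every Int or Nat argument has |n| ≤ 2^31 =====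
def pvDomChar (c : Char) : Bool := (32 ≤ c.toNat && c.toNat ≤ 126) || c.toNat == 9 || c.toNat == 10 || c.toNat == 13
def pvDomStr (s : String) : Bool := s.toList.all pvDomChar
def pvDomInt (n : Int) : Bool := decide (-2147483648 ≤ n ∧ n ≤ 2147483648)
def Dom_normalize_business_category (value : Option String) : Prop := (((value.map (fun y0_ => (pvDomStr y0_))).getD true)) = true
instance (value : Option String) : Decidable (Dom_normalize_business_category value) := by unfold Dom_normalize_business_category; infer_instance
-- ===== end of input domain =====

-- B rewrites the priority scan: instead of building a set of candidates and testing each fixed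
-- priority category against it, B builds a rank map once and makes one pass over the candidates,
-- keeping the (rank, category) pair of smallest rank (objective: idiomatic single pass).

-- ===== PORT A =====
def pvPriority : List String := ["Food", "Health/Wellness & Beauty", "Retail"]

def pvCleanValue (value : Option String) : String :=
  match value with
  | none => ""
  | some s => PySem.Str.strip s

def pvSplitMultiValue (value : Option String) : List String :=
  let cleaned := pvCleanValue value
  if cleaned = "" then []
  else
    match PySem.Str.split? cleaned ";" with
    | none => []   -- unreachable: the separator ";" is non-empty
    | some parts => (parts.map (fun item => PySem.Str.strip item)).filter (fun item => !(item == ""))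

-- the 'for category in BUSINESS_CATEGORY_PRIORITY: if category in unique_candidates: return category' loop
def pvPickPriority : List String → PySem.Set String → Option String
  | [], _ => none
  | c :: rest, s => if PySem.Set.contains s c then some c else pvPickPriority rest s

def normalize_business_category (value : Option String) : String :=
  let candidates := pvSplitMultiValue value
  match candidates with
  | [] => ""
  | c0 :: _ =>
    let unique : PySem.Set String := PySem.Set.ofList candidates
    match pvPickPriority pvPriority unique with
    | some category => category
    | none => c0

-- ===== PORT B =====
-- _RANK = {category: rank for rank, category in enumerate(BUSINESS_CATEGORY_PRIORITY)}
def pvRank : PySem.Dict String Int :=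
  (PySem.List.enumerate pvPriority).foldl
    (fun d p => d.insert p.2 p.1) PySem.Dict.empty

-- one iteration of B's loop body
def pvStep (best : Option (Int × String)) (candidate : String) : Option (Int × String) :=
  match PySem.Dict.get? pvRank candidate with
  | none => best
  | some rank =>
    match best with
    | none => some (rank, candidate)
    | some b => if rank < b.1 then some (rank, candidate) else best

def normalize_business_category_alt (value : Option String) : String :=
  let candidates := pvSplitMultiValue value
  match candidates with
  | [] => ""
  | c0 :: _ =>
    match candidates.foldl pvStep none with
    | some b => b.2
    | none => c0

-- ===== PRECONDITION & SPEC =====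
def Spec_normalize_business_category (value : Option String) (out : String) : Prop := out = normalize_business_category_alt value
instance (value : Option String) (out : String) : Decidable (Spec_normalize_business_category value out) := by unfold Spec_normalize_business_category; infer_instance

-- ===== CLAIM (what is proved, stated in full; the proofs are below) =====
def Claim_equal_normalize_business_category : Prop := ∀ (value : Option String), Dom_normalize_business_category value → Spec_normalize_business_category value (normalize_business_category value)

-- ===== LEMMAS AND PROOFS =====

def catF : String := "Food"
def catH : String := "Health/Wellness & Beauty"
def catR : String := "Retail"

-- the winner of B's scan, expressed by membership
def pvBestOf (cs : List String) : Option (Int × String) :=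
  if catF ∈ cs then some (0, catF)
  else if catH ∈ cs then some (1, catH)
  else if catR ∈ cs then some (2, catR)
  else none

def pvMerge (b o : Option (Int × String)) : Option (Int × String) :=
  match o with
  | none => b
  | some p =>
    match b with
    | none => some p
    | some q => if p.1 < q.1 then some p else some q

def pvOk (b : Option (Int × String)) : Prop :=
  b = none ∨ b = some (0, catF) ∨ b = some (1, catH) ∨ b = some (2, catR)

set_option maxRecDepth 8192 in
lemma pvRank_get (c : String) :
    PySem.Dict.get? pvRank c =
      if c = catF then some 0 else if c = catH then some 1
      else if c = catR then some 2 else none := by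
  have h : pvRank = PySem.Dict.mk [(catF, 0), (catH, 1), (catR, 2)] := by rfl
  rw [h]
  simp only [PySem.Dict.get?_mk_cons, beq_iff_eq]
  split_ifs <;> simp_all [eq_comm, catF, catH, catR, PySem.Dict.get?]

lemma pvStep_eq (b : Option (Int × String)) (c : String) :
    pvStep b c =
      pvMerge b (if c = catF then some (0, catF) else if c = catH then some (1, catH)
                 else if c = catR then some (2, catR) else none) := by
  unfold pvStep pvMerge
  rw [pvRank_get]
  split_ifs <;> cases b <;> simp_all

lemma pvFold_char (cs : List String) : ∀ b, pvOk b →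
    cs.foldl pvStep b = pvMerge b (pvBestOf cs) := by
  induction cs with
  | nil => intro b _; simp [pvMerge, pvBestOf]
  | cons c cs ih =>
    intro b hb
    have hok : pvOk (pvStep b c) := by
      rw [pvStep_eq]
      rcases hb with h | h | h | h <;> subst h <;>
        unfold pvOk pvMerge <;> split_ifs <;> simp
    rw [List.foldl_cons, ih _ hok, pvStep_eq]
    unfold pvBestOf
    rcases hb with h | h | h | h <;> subst h <;>
      by_cases hcF : c = catF <;> by_cases hcH : c = catH <;> by_cases hcR : c = catR <;>
      by_cases hF : catF ∈ cs <;> by_cases hH : catH ∈ cs <;> by_cases hR : catR ∈ cs <;>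
      simp_all [pvMerge, List.mem_cons, catF, catH, catR, eq_comm]

lemma pvPick_char (cs : List String) :
    pvPickPriority pvPriority (PySem.Set.ofList cs) =
      (pvBestOf cs).map (·.2) := by
  unfold pvPriority pvPickPriority pvBestOf
  by_cases hF : catF ∈ cs <;> by_cases hH : catH ∈ cs <;> by_cases hR : catR ∈ cs <;>
    simp_all [pvPickPriority, PySem.Set.contains_eq_listContains, PySem.Set.mem_ofList, catF, catH, catR]

-- ===== VERDICT (by name: the statement is the Claim_ definition above) =====
theorem normalize_business_category_spec : Claim_equal_normalize_business_category := by
  intro value _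
  unfold Spec_normalize_business_category normalize_business_category normalize_business_category_alt
  cases hc : pvSplitMultiValue value with
  | nil => rfl
  | cons c0 rest =>
    simp only []
    rw [pvPick_char, pvFold_char _ none (Or.inl rfl)]
    simp [pvMerge]
    cases pvBestOf (c0 :: rest) <;> simp
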